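-- pv_equiv track=rewrite | github.com/cherifelkhodja/bobby | backend/app/contract_management/domain/services/article_numbering.py | compute_article_numbers
-- ===== SOURCE A (Python) =====
-- from typing import Any
--
-- def compute_article_numbers(config: dict[str, Any]) -> dict[str, int]:
--     """Compute article numbers dynamically based on active clauses.
--
--     Contract articles are numbered sequentially, skipping articles
--     for disabled clauses. This keeps numbering clean and correct
--     regardless of which optional clauses are included.
--
--     Args:
--         config: Contract configuration with clause toggles.
--
--     Returns:
--         Dictionary mapping article keys to their numbers.
--     """
--     articles = []
--
--     # Fixed articles
--     articles.append("objet")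
--     articles.append("duree")
--     articles.append("conditions_financieres")
--     articles.append("modalites_facturation")
--     articles.append("obligations_prestataire")
--
--     # Conditional articles
--     if config.get("include_confidentiality", True):
--         articles.append("confidentialite")
--     if config.get("include_non_compete", False):
--         articles.append("non_concurrence")
--     if config.get("include_intellectual_property", True):
--         articles.append("propriete_intellectuelle")
--     if config.get("include_liability", True):
--         articles.append("responsabilite")
--
--     # Fixed final articles
--     articles.append("resiliation")
--     articles.append("droit_applicable")
--
--     return {key: idx + 1 for idx, key in enumerate(articles)}
-- ===== SOURCE B (Python) =====
-- def compute_article_numbers(config):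
--     # Closed-form numbering: each article's number is 1 + (number of
--     # included articles before it), computed arithmetically from the four
--     # clause flags -- no article list is ever built.
--     c = 1 if config.get("include_confidentiality", True) else 0
--     n = 1 if config.get("include_non_compete", False) else 0
--     p = 1 if config.get("include_intellectual_property", True) else 0
--     l = 1 if config.get("include_liability", True) else 0
--     result = {
--         "objet": 1,
--         "duree": 2,
--         "conditions_financieres": 3,
--         "modalites_facturation": 4,
--         "obligations_prestataire": 5,
--     }
--     if c:
--         result["confidentialite"] = 6
--     if n:
--         result["non_concurrence"] = 6 + c
--     if p:
--         result["propriete_intellectuelle"] = 6 + c + n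
--     if l:
--         result["responsabilite"] = 6 + c + n + p
--     result["resiliation"] = 6 + c + n + p + l
--     result["droit_applicable"] = 7 + c + n + p + l
--     return result
-- ===== Notes on version B (the rewrite author's own statement) =====
-- stated objective: alternative
-- what changed: Instead of building an ordered article list and enumerating it, B assigns each article its number directly by a closed-form arithmetic offset (1 + count of included predecessors, from bool-to-int flag sums), never constructing or scanning an intermediate list.
import Mathlib
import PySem

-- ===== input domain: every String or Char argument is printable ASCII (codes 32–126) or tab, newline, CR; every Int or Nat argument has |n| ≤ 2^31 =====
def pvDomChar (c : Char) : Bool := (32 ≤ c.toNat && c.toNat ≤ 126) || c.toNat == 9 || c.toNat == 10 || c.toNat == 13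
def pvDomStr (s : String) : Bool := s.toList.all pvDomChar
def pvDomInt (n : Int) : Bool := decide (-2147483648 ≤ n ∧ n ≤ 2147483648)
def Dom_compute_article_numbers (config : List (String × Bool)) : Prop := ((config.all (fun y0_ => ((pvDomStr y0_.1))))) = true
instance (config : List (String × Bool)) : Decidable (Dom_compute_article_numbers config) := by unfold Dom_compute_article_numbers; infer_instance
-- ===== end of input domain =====

-- B drops A's list-building-and-enumerate entirely: each article gets its number by a
-- closed-form arithmetic offset (1 + count of included predecessors from 0/1 flag sums); objective: alternative.

-- ===== PORT A =====
def compute_article_numbers (config : List (String × Bool)) : List (String × Int) :=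
  let articles : List String := []
  -- Fixed articles
  let articles := articles ++ ["objet"]
  let articles := articles ++ ["duree"]
  let articles := articles ++ ["conditions_financieres"]
  let articles := articles ++ ["modalites_facturation"]
  let articles := articles ++ ["obligations_prestataire"]
  -- Conditional articles
  let articles := if PySem.Dict.getD (PySem.Dict.mk config) "include_confidentiality" true then articles ++ ["confidentialite"] else articles
  let articles := if PySem.Dict.getD (PySem.Dict.mk config) "include_non_compete" false then articles ++ ["non_concurrence"] else articles
  let articles := if PySem.Dict.getD (PySem.Dict.mk config) "include_intellectual_property" true then articles ++ ["propriete_intellectuelle"] else articles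
  let articles := if PySem.Dict.getD (PySem.Dict.mk config) "include_liability" true then articles ++ ["responsabilite"] else articles
  -- Fixed final articles
  let articles := articles ++ ["resiliation"]
  let articles := articles ++ ["droit_applicable"]
  (PySem.List.enumerate articles).map (fun p => (p.2, p.1 + 1))

-- ===== PORT B =====
def compute_article_numbers_alt (config : List (String × Bool)) : List (String × Int) :=
  let c : Int := if PySem.Dict.getD (PySem.Dict.mk config) "include_confidentiality" true then 1 else 0
  let n : Int := if PySem.Dict.getD (PySem.Dict.mk config) "include_non_compete" false then 1 else 0
  let p : Int := if PySem.Dict.getD (PySem.Dict.mk config) "include_intellectual_property" true then 1 else 0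
  let l : Int := if PySem.Dict.getD (PySem.Dict.mk config) "include_liability" true then 1 else 0
  let result : PySem.Dict String Int := PySem.Dict.mk
    [ ("objet", 1), ("duree", 2), ("conditions_financieres", 3),
      ("modalites_facturation", 4), ("obligations_prestataire", 5) ]
  let result := if c ≠ 0 then result.insert "confidentialite" 6 else result
  let result := if n ≠ 0 then result.insert "non_concurrence" (6 + c) else result
  let result := if p ≠ 0 then result.insert "propriete_intellectuelle" (6 + c + n) else result
  let result := if l ≠ 0 then result.insert "responsabilite" (6 + c + n + p) else result
  let result := result.insert "resiliation" (6 + c + n + p + l)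
  let result := result.insert "droit_applicable" (7 + c + n + p + l)
  result.items

-- ===== PRECONDITION & SPEC =====
def Spec_compute_article_numbers (config : List (String × Bool)) (out : List (String × Int)) : Prop := out = compute_article_numbers_alt config
instance (config : List (String × Bool)) (out : List (String × Int)) : Decidable (Spec_compute_article_numbers config out) := by unfold Spec_compute_article_numbers; infer_instance

-- ===== CLAIM (what is proved, stated in full; the proofs are below) =====
def Claim_equal_compute_article_numbers : Prop := ∀ (config : List (String × Bool)), Dom_compute_article_numbers config → Spec_compute_article_numbers config (compute_article_numbers config)

-- ===== LEMMAS AND PROOFS =====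

-- ===== VERDICT (by name: the statement is the Claim_ definition above) =====
theorem compute_article_numbers_spec : Claim_equal_compute_article_numbers := by
  intro config _
  unfold Spec_compute_article_numbers compute_article_numbers compute_article_numbers_alt
  generalize PySem.Dict.getD (PySem.Dict.mk config) "include_confidentiality" true = b1
  generalize PySem.Dict.getD (PySem.Dict.mk config) "include_non_compete" false = b2
  generalize PySem.Dict.getD (PySem.Dict.mk config) "include_intellectual_property" true = b3
  generalize PySem.Dict.getD (PySem.Dict.mk config) "include_liability" true = b4
  cases b1 <;> cases b2 <;> cases b3 <;> cases b4 <;> rfl
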